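-- pv_equiv track=rewrite | github.com/baeksangha/python_sw | 3812_호중이의큐브색칠/source.py | solution
-- ===== SOURCE A (Python) =====
-- def solution(x, y, z, a, b, c, n):
--     x_line = [0] * n
--     y_line = [0] * n
--     z_line = [0] * n
--     xy_line = [0] * n
--     xyz_line = [0] * n
--
--     for i in range(x):
--         x_line[abs(i-a) % n] += 1
--     for i in range(y):
--         y_line[abs(i-b) % n] += 1
--     for i in range(z):
--         z_line[abs(i-c) % n] += 1
--
--     for i in range(n):
--         for j in range(n):
--             xy_line[(i+j) % n] += x_line[i] * y_line[j]
--     for i in range(n):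
--         for j in range(n):
--             xyz_line[(i+j) % n] += xy_line[i] * z_line[j]
--     return " ".join(list(map(str, xyz_line)))
-- ===== SOURCE B (Python) =====
-- def solution(x, y, z, a, b, c, n):
--     def count_in(lo, hi, r):
--         # number of t in [lo, hi] with t % n == r  (requires n >= 1)
--         if hi < lo:
--             return 0
--         return (hi - r) // n - (lo - 1 - r) // n
--
--     def hist(m, s):
--         # residue counts of abs(i - s) % n over i in range(m), by interval counting:
--         # the multiset {abs(i - s) : 0 <= i < m} is one or two runs of consecutive integers
--         if s <= 0:
--             return [count_in(-s, m - 1 - s, r) for r in range(n)]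
--         if s >= m:
--             return [count_in(s - m + 1, s, r) for r in range(n)]
--         return [count_in(1, s, r) + count_in(0, m - 1 - s, r) for r in range(n)]
--
--     def conv(u, v):
--         # cyclic convolution, gathering: out[k] = sum_i u[i] * v[(k-i) % n]
--         return [sum(u[i] * v[(k - i) % n] for i in range(n)) for k in range(n)]
--
--     w = conv(conv(hist(x, a), hist(y, b)), hist(z, c))
--     return " ".join(map(str, w))
-- ===== Notes on version B (the rewrite author's own statement) =====
-- stated objective: alternative
-- what changed: A scatters: it increments a histogram cell per loop iteration over range(x)/range(y)/range(z) and builds both cyclic convolutions with nested scatter-update loops; B computes each histogram entry in closed form by counting an arithmetic interval's residues with floor division (no per-element loop) and gathers each convolution entry directly as sum(u[i]*v[(k-i)%n]).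
import Mathlib
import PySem

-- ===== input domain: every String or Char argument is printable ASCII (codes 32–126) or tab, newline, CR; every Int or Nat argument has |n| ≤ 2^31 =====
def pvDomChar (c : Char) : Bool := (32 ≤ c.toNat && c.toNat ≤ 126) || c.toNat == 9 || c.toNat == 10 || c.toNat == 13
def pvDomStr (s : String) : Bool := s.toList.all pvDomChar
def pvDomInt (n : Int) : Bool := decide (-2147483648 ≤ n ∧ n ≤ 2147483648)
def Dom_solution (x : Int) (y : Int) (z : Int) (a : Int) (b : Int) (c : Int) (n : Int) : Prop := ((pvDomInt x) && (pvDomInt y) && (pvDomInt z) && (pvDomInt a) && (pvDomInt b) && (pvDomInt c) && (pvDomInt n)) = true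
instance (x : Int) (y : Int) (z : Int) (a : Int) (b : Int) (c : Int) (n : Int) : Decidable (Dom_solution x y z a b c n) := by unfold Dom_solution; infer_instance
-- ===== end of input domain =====

-- B replaces A's per-element scatter loops over range(x)/range(y)/range(z) by closed-form
-- residue counting of arithmetic intervals, and the scatter convolutions by gathering
-- comprehensions (objective: alternative).

-- ===== PORT A =====
-- 'l[i] += w' for an in-range index i (under Pre_ every index is in [0, n))
def pyAddAt (l : List Int) (i : Int) (w : Int) : List Int :=
  PySem.List.pySetD l i (PySem.List.pyGetD l i 0 + w)

def solution (x : Int) (y : Int) (z : Int) (a : Int) (b : Int) (c : Int) (n : Int) : String :=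
  let x_line := (PySem.List.pyRange 0 x).foldl
    (fun l i => pyAddAt l (PySem.Int.mod |i - a| n) 1) (List.replicate n.toNat 0)
  let y_line := (PySem.List.pyRange 0 y).foldl
    (fun l i => pyAddAt l (PySem.Int.mod |i - b| n) 1) (List.replicate n.toNat 0)
  let z_line := (PySem.List.pyRange 0 z).foldl
    (fun l i => pyAddAt l (PySem.Int.mod |i - c| n) 1) (List.replicate n.toNat 0)
  let xy_line := (PySem.List.pyRange 0 n).foldl
    (fun l i => (PySem.List.pyRange 0 n).foldl
      (fun l2 j => pyAddAt l2 (PySem.Int.mod (i + j) n)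
        (PySem.List.pyGetD x_line i 0 * PySem.List.pyGetD y_line j 0)) l)
    (List.replicate n.toNat 0)
  let xyz_line := (PySem.List.pyRange 0 n).foldl
    (fun l i => (PySem.List.pyRange 0 n).foldl
      (fun l2 j => pyAddAt l2 (PySem.Int.mod (i + j) n)
        (PySem.List.pyGetD xy_line i 0 * PySem.List.pyGetD z_line j 0)) l)
    (List.replicate n.toNat 0)
  PySem.Str.join " " (xyz_line.map PySem.Int.toStr)

-- ===== PORT B =====
-- number of t in [lo, hi] with t % n == r (n >= 1)
def countIn (n lo hi r : Int) : Int :=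
  if hi < lo then 0
  else PySem.Int.floordiv (hi - r) n - PySem.Int.floordiv (lo - 1 - r) n

-- residue counts of abs(i - s) % n over i in range(m), by interval counting
def histB (n m s : Int) : List Int :=
  if s ≤ 0 then (PySem.List.pyRange 0 n).map (fun r => countIn n (-s) (m - 1 - s) r)
  else if s ≥ m then (PySem.List.pyRange 0 n).map (fun r => countIn n (s - m + 1) s r)
  else (PySem.List.pyRange 0 n).map (fun r => countIn n 1 s r + countIn n 0 (m - 1 - s) r)

-- cyclic convolution, gathering: out[k] = sum_i u[i] * v[(k-i) % n]
def convB (n : Int) (u v : List Int) : List Int :=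
  (PySem.List.pyRange 0 n).map (fun k =>
    ((PySem.List.pyRange 0 n).map (fun i =>
      PySem.List.pyGetD u i 0 * PySem.List.pyGetD v (PySem.Int.mod (k - i) n) 0)).sum)

def solution_alt (x : Int) (y : Int) (z : Int) (a : Int) (b : Int) (c : Int) (n : Int) : String :=
  PySem.Str.join " "
    ((convB n (convB n (histB n x a) (histB n y b)) (histB n z c)).map PySem.Int.toStr)

-- ===== PRECONDITION & SPEC =====
-- Pre_ excludes exactly the inputs where A raises: n = 0 with a nonempty range loop
-- (ZeroDivisionError) or n < 0 with one (IndexError on the empty lists).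
def Pre_solution (x : Int) (y : Int) (z : Int) (a : Int) (b : Int) (c : Int) (n : Int) : Prop :=
  1 ≤ n ∨ (x ≤ 0 ∧ y ≤ 0 ∧ z ≤ 0)
instance (x : Int) (y : Int) (z : Int) (a : Int) (b : Int) (c : Int) (n : Int) : Decidable (Pre_solution x y z a b c n) := by unfold Pre_solution; infer_instance

def pvWitness_solution : Int × Int × Int × Int × Int × Int × Int := (2, 3, 1, 1, 0, 4, 3)

def Spec_solution (x : Int) (y : Int) (z : Int) (a : Int) (b : Int) (c : Int) (n : Int) (out : String) : Prop := out = solution_alt x y z a b c n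
instance (x : Int) (y : Int) (z : Int) (a : Int) (b : Int) (c : Int) (n : Int) (out : String) : Decidable (Spec_solution x y z a b c n out) := by unfold Spec_solution; infer_instance

-- ===== CLAIM (what is proved, stated in full; the proofs are below) =====
def Claim_equal_solution : Prop := ∀ (x : Int) (y : Int) (z : Int) (a : Int) (b : Int) (c : Int) (n : Int), Dom_solution x y z a b c n → Pre_solution x y z a b c n → Spec_solution x y z a b c n (solution x y z a b c n)
-- ===== LEMMAS AND PROOFS =====

-- A's histogram loop, named for the proofs
def lineA (n m s : Int) : List Int :=
  (PySem.List.pyRange 0 m).foldl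
    (fun l i => pyAddAt l (PySem.Int.mod |i - s| n) 1) (List.replicate n.toNat 0)

-- A's scatter convolution loop, named for the proofs
def convA (n : Int) (u v : List Int) : List Int :=
  (PySem.List.pyRange 0 n).foldl
    (fun l i => (PySem.List.pyRange 0 n).foldl
      (fun l2 j => pyAddAt l2 (PySem.Int.mod (i + j) n)
        (PySem.List.pyGetD u i 0 * PySem.List.pyGetD v j 0)) l)
    (List.replicate n.toNat 0)

lemma solution_eq (x y z a b c n : Int) :
    solution x y z a b c n =
      PySem.Str.join " "
        ((convA n (convA n (lineA n x a) (lineA n y b)) (lineA n z c)).map PySem.Int.toStr) := rfl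

-- generic scatter loop: entry k of "for i in L: l[f i] += w i"
lemma scatter_length (L : List Int) (f w : Int → Int) (acc : List Int) :
    (L.foldl (fun l i => pyAddAt l (f i) (w i)) acc).length = acc.length := by
  induction L generalizing acc with
  | nil => rfl
  | cons hd tl ih => rw [List.foldl_cons, ih]; simp [pyAddAt, PySem.List.length_pySetD]

lemma scatter_entry (L : List Int) (f w : Int → Int) (acc : List Int)
    (hf : ∀ i ∈ L, 0 ≤ f i ∧ f i < (acc.length : Int)) (k : Nat) (hk : k < acc.length) :
    PySem.List.pyGetD (L.foldl (fun l i => pyAddAt l (f i) (w i)) acc) (k : Int) 0 =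
      PySem.List.pyGetD acc (k : Int) 0 +
        ((L.filter (fun i => decide (f i = (k : Int)))).map w).sum := by
  induction L generalizing acc with
  | nil => simp
  | cons hd tl ih =>
    rw [List.foldl_cons]
    have hhd := hf hd (by simp)
    have hlen : (pyAddAt acc (f hd) (w hd)).length = acc.length := by
      simp [pyAddAt, PySem.List.length_pySetD]
    have hcast : f hd = (((f hd).toNat : Nat) : Int) := by omega
    rw [ih (pyAddAt acc (f hd) (w hd))
      (by rw [hlen]; exact fun i hi => hf i (by simp [hi])) (by omega)]
    have hset : PySem.List.pyGetD (pyAddAt acc (f hd) (w hd)) (k : Int) 0 =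
        if k = (f hd).toNat then PySem.List.pyGetD acc (f hd) 0 + w hd
        else PySem.List.pyGetD acc (k : Int) 0 := by
      rw [pyAddAt, hcast]
      exact PySem.List.pyGetD_pySetD_natCast acc (f hd).toNat k _ 0 (by omega)
    rw [hset, List.filter_cons]
    by_cases hc : f hd = (k : Int)
    · rw [if_pos (by omega : k = (f hd).toNat), if_pos (by simp [hc])]
      rw [List.map_cons, List.sum_cons, hc]
      ring
    · rw [if_neg (by omega : ¬ k = (f hd).toNat), if_neg (by simp [hc])]

-- unique j in range(n) with (i + j) % n = k
lemma filter_mod_singleton (n i : Int) (hn : 0 < n) (k : Nat) (hk : (k : Int) < n) :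
    (PySem.List.pyRange 0 n).filter (fun j => decide ((i + j) % n = (k : Int))) =
      [((k : Int) - i) % n] := by
  set j0 := ((k : Int) - i) % n with hj0def
  have hj0 : 0 ≤ j0 := Int.emod_nonneg _ (by omega)
  have hj0n : j0 < n := Int.emod_lt_of_pos _ hn
  have hhit : (i + j0) % n = (k : Int) := by
    rw [hj0def, Int.add_emod, Int.emod_emod_of_dvd _ (dvd_refl n), ← Int.add_emod]
    simp
    exact Int.emod_eq_of_lt (by positivity) hk
  have huniq : ∀ j : Int, 0 ≤ j → j < n → (i + j) % n = (k : Int) → j = j0 := by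
    intro j h1 h2 h3
    have heq : (i + j) % n = (i + j0) % n := by rw [h3, hhit]
    have hdvd := Int.ModEq.dvd heq
    have h4 : j - j0 = -(i + j0 - (i + j)) := by ring
    have h5 : n ∣ j - j0 := by rw [h4]; exact dvd_neg.mpr hdvd
    have := Int.eq_zero_of_abs_lt_dvd h5 (abs_lt.mpr ⟨by omega, by omega⟩)
    omega
  rw [PySem.List.pyRange_one_append 0 j0 n hj0 (by omega),
      PySem.List.pyRange_one_cons hj0n, List.filter_append, List.filter_cons]
  have h1 : (PySem.List.pyRange 0 j0).filter (fun j => decide ((i + j) % n = (k : Int))) = [] := by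
    rw [List.filter_eq_nil_iff]
    intro j hj
    rw [PySem.List.mem_pyRange_one] at hj
    simp only [decide_eq_true_eq]
    intro hcon
    have := huniq j hj.1 (by omega) hcon
    omega
  have h2 : (PySem.List.pyRange (j0 + 1) n).filter
      (fun j => decide ((i + j) % n = (k : Int))) = [] := by
    rw [List.filter_eq_nil_iff]
    intro j hj
    rw [PySem.List.mem_pyRange_one] at hj
    simp only [decide_eq_true_eq]
    intro hcon
    have := huniq j (by omega) hj.2 hcon
    omega
  rw [h1, h2, if_pos (by simp [hhit])]
  simp

-- division step: A / n counts one more multiple than (A - 1) / n exactly when n ∣ A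
lemma ediv_sub_one (A n : Int) (hn : 0 < n) :
    A / n = (A - 1) / n + (if A % n = 0 then 1 else 0) := by
  by_cases h : A % n = 0
  · rw [if_pos h]
    obtain ⟨q, hq⟩ := Int.dvd_of_emod_eq_zero h
    subst hq
    rw [Int.mul_ediv_cancel_left _ (by omega : n ≠ 0)]
    rw [((Int.ediv_emod_unique (r := n - 1) (q := q - 1) hn).mpr
      ⟨by linarith, by omega, by omega⟩).1]
    ring
  · rw [if_neg h, add_zero]
    have h2 : 0 ≤ A % n := Int.emod_nonneg _ (by omega)
    have h3 : A % n < n := Int.emod_lt_of_pos _ hn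
    have h1 : n * (A / n) + A % n = A := Int.mul_ediv_add_emod A n
    exact (((Int.ediv_emod_unique (r := A % n - 1) (q := A / n) hn).mpr
      ⟨by linarith, by omega, by omega⟩).1).symm

-- closed-form interval count
lemma interval_count (n r : Int) (hn : 0 < n) (hr : 0 ≤ r) (hrn : r < n) : ∀ (lo hi : Int),
    lo ≤ hi + 1 →
    (((PySem.List.pyRange lo (hi + 1)).filter (fun t => decide (t % n = r))).length : Int) =
      (hi - r) / n - (lo - 1 - r) / n := by
  suffices H : ∀ (N : Nat) (lo hi : Int), (hi + 1 - lo).toNat = N → lo ≤ hi + 1 →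
      (((PySem.List.pyRange lo (hi + 1)).filter (fun t => decide (t % n = r))).length : Int) =
      (hi - r) / n - (lo - 1 - r) / n by
    intro lo hi h; exact H (hi + 1 - lo).toNat lo hi rfl h
  intro N
  induction N with
  | zero =>
    intro lo hi h hle
    have hlo : lo = hi + 1 := by omega
    rw [PySem.List.pyRange_one_eq_nil (by omega)]
    subst hlo
    simp
  | succ N ih =>
    intro lo hi h hle
    have hlohi : lo ≤ hi := by omega
    rw [PySem.List.pyRange_one_succ_right hlohi, List.filter_append, List.length_append]
    have hrec : (((PySem.List.pyRange lo (hi - 1 + 1)).filter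
        (fun t => decide (t % n = r))).length : Int) =
        (hi - 1 - r) / n - (lo - 1 - r) / n := ih lo (hi - 1) (by omega) (by omega)
    have hstep : (hi - r) / n = (hi - 1 - r) / n + (if (hi - r) % n = 0 then 1 else 0) := by
      have hthis := ediv_sub_one (hi - r) n hn
      have h2 : hi - r - 1 = hi - 1 - r := by ring
      rw [h2] at hthis
      exact hthis
    have hiff : (hi % n = r) ↔ ((hi - r) % n = 0) := by
      constructor
      · intro hh
        have hsub : (hi - r) % n = (hi % n - r % n) % n := Int.sub_emod hi r n
        rw [hsub, hh, Int.emod_eq_of_lt hr hrn] at *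
        simp
      · intro hh
        have hd : n ∣ hi - r := Int.dvd_of_emod_eq_zero hh
        have hme : hi % n = r % n := Int.modEq_iff_dvd.mpr (by simpa [neg_sub] using dvd_neg.mpr hd)
        rw [hme, Int.emod_eq_of_lt hr hrn]
    have hcast : hi - 1 + 1 = hi := by ring
    rw [hcast] at hrec
    by_cases hh : hi % n = r
    · simp only [List.filter_cons, List.filter_nil, hh, decide_true, if_true]
      push_cast
      rw [hrec, hstep, if_pos (hiff.mp hh)]
      simp
      ring
    · simp only [List.filter_cons, List.filter_nil, hh, decide_false]
      push_cast
      rw [hrec, hstep, if_neg (fun hcon => hh (hiff.mpr hcon))]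
      simp

-- interval count equals B's countIn
lemma cnt_closed (n r : Int) (hn : 0 < n) (hr : 0 ≤ r) (hrn : r < n) (lo hi : Int) :
    (((PySem.List.pyRange lo (hi + 1)).filter (fun t => decide (t % n = r))).length : Int) =
      countIn n lo hi r := by
  unfold countIn
  by_cases h : hi < lo
  · rw [if_pos h, PySem.List.pyRange_one_eq_nil (by omega)]
    simp
  · rw [if_neg h, PySem.Int.floordiv_eq_ediv_of_pos hn, PySem.Int.floordiv_eq_ediv_of_pos hn]
    exact interval_count n r hn hr hrn lo hi (by omega)

-- shift reindexing of a filtered count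
lemma shift_count (p : Int → Bool) (c : Int) : ∀ (a b : Int),
    ((PySem.List.pyRange a b).filter (fun i => p (i + c))).length =
      ((PySem.List.pyRange (a + c) (b + c)).filter p).length := by
  suffices H : ∀ (N : Nat) (a b : Int), (b - a).toNat = N →
      ((PySem.List.pyRange a b).filter (fun i => p (i + c))).length =
      ((PySem.List.pyRange (a + c) (b + c)).filter p).length by
    intro a b; exact H (b - a).toNat a b rfl
  intro N
  induction N with
  | zero =>
    intro a b h
    rw [PySem.List.pyRange_one_eq_nil (by omega), PySem.List.pyRange_one_eq_nil (by omega)]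
    rfl
  | succ N ih =>
    intro a b h
    rw [PySem.List.pyRange_one_cons (by omega : a < b),
        PySem.List.pyRange_one_cons (by omega : a + c < b + c),
        List.filter_cons, List.filter_cons]
    have hrec := ih (a + 1) b (by omega)
    have hc1 : a + 1 + c = a + c + 1 := by ring
    rw [hc1] at hrec
    cases hp : p (a + c) <;> simp [hrec]

-- reflection reindexing of a filtered count
lemma refl_count (p : Int → Bool) (c : Int) : ∀ (a b : Int),
    ((PySem.List.pyRange a b).filter (fun i => p (c - i))).length =
      ((PySem.List.pyRange (c - b + 1) (c - a + 1)).filter p).length := by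
  suffices H : ∀ (N : Nat) (a b : Int), (b - a).toNat = N →
      ((PySem.List.pyRange a b).filter (fun i => p (c - i))).length =
      ((PySem.List.pyRange (c - b + 1) (c - a + 1)).filter p).length by
    intro a b; exact H (b - a).toNat a b rfl
  intro N
  induction N with
  | zero =>
    intro a b h
    rw [PySem.List.pyRange_one_eq_nil (by omega), PySem.List.pyRange_one_eq_nil (by omega)]
    rfl
  | succ N ih =>
    intro a b h
    rw [PySem.List.pyRange_one_cons (by omega : a < b),
        PySem.List.pyRange_one_succ_right (by omega : c - b + 1 ≤ c - a),
        List.filter_cons, List.filter_append]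
    have hrec := ih (a + 1) b (by omega)
    have hc1 : c - (a + 1) + 1 = c - a := by ring
    rw [hc1] at hrec
    cases hp : p (c - a) <;> simp [hp, hrec]

lemma histB_length (n m s : Int) : (histB n m s).length = n.toNat := by
  unfold histB
  split
  · simp [PySem.List.length_pyRange_one]
  · split <;> simp [PySem.List.length_pyRange_one]

lemma convB_length (n : Int) (u v : List Int) : (convB n u v).length = n.toNat := by
  simp [convB, PySem.List.length_pyRange_one]

lemma count_line (n m s : Int) (hn : 0 < n) (k : Nat) (hkn : (k : Int) < n) :
    PySem.List.pyGetD (lineA n m s) (k : Int) 0 =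
      (((PySem.List.pyRange 0 m).filter
        (fun i => decide (|i - s| % n = (k : Int)))).length : Int) := by
  have hkN : k < n.toNat := by omega
  have hf : ∀ i ∈ PySem.List.pyRange 0 m, 0 ≤ PySem.Int.mod |i - s| n ∧
      PySem.Int.mod |i - s| n < ((List.replicate n.toNat (0:Int)).length : Int) := by
    intro i _
    refine ⟨PySem.Int.mod_nonneg _ hn, ?_⟩
    have := PySem.Int.mod_lt |i - s| hn
    simp only [List.length_replicate]
    omega
  have hA := scatter_entry (PySem.List.pyRange 0 m)
      (fun i => PySem.Int.mod |i - s| n) (fun _ => 1)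
      (List.replicate n.toNat 0) hf k (by simpa using hkN)
  unfold lineA
  rw [hA, PySem.List.pyGetD_natCast, List.getD_replicate _ hkN,
      PySem.List.sum_map_const_int]
  rw [List.filter_congr (fun i _ => by
    rw [PySem.Int.mod_eq_emod_of_pos hn] :
    ∀ i ∈ PySem.List.pyRange 0 m, decide (PySem.Int.mod |i - s| n = (k : Int)) =
      decide (|i - s| % n = (k : Int)))]
  ring

lemma hist_eq (n m s : Int) (hn : 0 < n) : lineA n m s = histB n m s := by
  have hNn : ((n.toNat : Nat) : Int) = n := by omega
  have hlenA : (lineA n m s).length = n.toNat := by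
    unfold lineA; rw [scatter_length, List.length_replicate]
  apply List.ext_getElem (by rw [hlenA, histB_length])
  intro k hk1 hk2
  have hkN : k < n.toNat := by rw [hlenA] at hk1; exact hk1
  have hkn : (k : Int) < n := by omega
  have hk0 : (0 : Int) ≤ (k : Int) := by positivity
  rw [← List.getD_eq_getElem (lineA n m s) 0 hk1, ← List.getD_eq_getElem (histB n m s) 0 hk2,
      ← PySem.List.pyGetD_natCast, ← PySem.List.pyGetD_natCast,
      count_line n m s hn k hkn]
  set p : Int → Bool := fun t => decide (t % n = (k : Int)) with hp
  have hrange : PySem.List.pyRange 0 n = PySem.List.pyRange 0 ((n.toNat : Nat) : Int) := by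
    rw [hNn]
  unfold histB
  by_cases hs0 : s ≤ 0
  · rw [if_pos hs0, hrange, PySem.List.pyGetD_map_pyRange _ n.toNat k _ hkN]
    have habs : ∀ i ∈ PySem.List.pyRange 0 m,
        decide (|i - s| % n = (k : Int)) = p (i + (-s)) := by
      intro i hi
      rw [PySem.List.mem_pyRange_one] at hi
      have : |i - s| = i + (-s) := by rw [abs_of_nonneg (by omega)]; ring
      rw [this, hp]
    rw [List.filter_congr habs]
    have hsh := shift_count p (-s) 0 m
    rw [show (0:Int) + -s = -s by ring, show m + -s = (m - 1 - s) + 1 by ring] at hsh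
    rw [hsh, cnt_closed n (k : Int) hn hk0 hkn (-s) (m - 1 - s)]
  · rw [if_neg hs0]
    by_cases hsm : s ≥ m
    · rw [if_pos hsm, hrange, PySem.List.pyGetD_map_pyRange _ n.toNat k _ hkN]
      have habs : ∀ i ∈ PySem.List.pyRange 0 m,
          decide (|i - s| % n = (k : Int)) = p (s - i) := by
        intro i hi
        rw [PySem.List.mem_pyRange_one] at hi
        have : |i - s| = s - i := by rw [abs_of_nonpos (by omega)]; ring
        rw [this, hp]
      rw [List.filter_congr habs]
      have hrf := refl_count p s 0 m
      rw [show s - 0 + 1 = s + 1 by ring] at hrf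
      rw [hrf, cnt_closed n (k : Int) hn hk0 hkn (s - m + 1) s]
    · rw [if_neg hsm, hrange, PySem.List.pyGetD_map_pyRange _ n.toNat k _ hkN]
      rw [PySem.List.pyRange_one_append 0 s m (by omega) (by omega),
          List.filter_append, List.length_append]
      have h1 : ((PySem.List.pyRange 0 s).filter
          (fun i => decide (|i - s| % n = (k : Int)))).length =
          ((PySem.List.pyRange 1 (s + 1)).filter p).length := by
        have habs : ∀ i ∈ PySem.List.pyRange 0 s,
            decide (|i - s| % n = (k : Int)) = p (s - i) := by
          intro i hi
          rw [PySem.List.mem_pyRange_one] at hi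
          have : |i - s| = s - i := by rw [abs_of_nonpos (by omega)]; ring
          rw [this, hp]
        rw [List.filter_congr habs]
        have hrf := refl_count p s 0 s
        rw [show s - s + 1 = 1 by ring, show s - 0 + 1 = s + 1 by ring] at hrf
        exact hrf
      have h2 : ((PySem.List.pyRange s m).filter
          (fun i => decide (|i - s| % n = (k : Int)))).length =
          ((PySem.List.pyRange 0 (m - s)).filter p).length := by
        have habs : ∀ i ∈ PySem.List.pyRange s m,
            decide (|i - s| % n = (k : Int)) = p (i + (-s)) := by
          intro i hi
          rw [PySem.List.mem_pyRange_one] at hi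
          have : |i - s| = i + (-s) := by rw [abs_of_nonneg (by omega)]; ring
          rw [this, hp]
        rw [List.filter_congr habs]
        have hsh := shift_count p (-s) s m
        rw [show s + -s = 0 by ring, show m + -s = m - s by ring] at hsh
        exact hsh
      push_cast
      rw [h1, h2]
      have c1 := cnt_closed n (k : Int) hn hk0 hkn 1 s
      have c2 := cnt_closed n (k : Int) hn hk0 hkn 0 (m - 1 - s)
      rw [show s + 1 = s + 1 by ring] at c1
      rw [show (m - 1 - s) + 1 = m - s by ring] at c2
      rw [c1, c2]

lemma conv_outer (n : Int) (hn : 0 < n) (u v : List Int) :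
    ∀ (L : List Int) (acc : List Int), acc.length = n.toNat →
    ((L.foldl (fun l i => (PySem.List.pyRange 0 n).foldl
        (fun l2 j => pyAddAt l2 (PySem.Int.mod (i + j) n)
          (PySem.List.pyGetD u i 0 * PySem.List.pyGetD v j 0)) l) acc).length = n.toNat ∧
     ∀ (k : Nat), k < n.toNat →
       PySem.List.pyGetD (L.foldl (fun l i => (PySem.List.pyRange 0 n).foldl
          (fun l2 j => pyAddAt l2 (PySem.Int.mod (i + j) n)
            (PySem.List.pyGetD u i 0 * PySem.List.pyGetD v j 0)) l) acc) (k : Int) 0 =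
         PySem.List.pyGetD acc (k : Int) 0 +
           (L.map (fun i => PySem.List.pyGetD u i 0 *
             PySem.List.pyGetD v (((k : Int) - i) % n) 0)).sum) := by
  intro L
  induction L with
  | nil => intro acc hacc; exact ⟨hacc, fun k _ => by simp⟩
  | cons hd tl ih =>
    intro acc hacc
    rw [List.foldl_cons]
    set acc' := (PySem.List.pyRange 0 n).foldl
      (fun l2 j => pyAddAt l2 (PySem.Int.mod (hd + j) n)
        (PySem.List.pyGetD u hd 0 * PySem.List.pyGetD v j 0)) acc with hacc'
    have hlen' : acc'.length = n.toNat := by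
      rw [hacc', scatter_length, hacc]
    obtain ⟨hL, hE⟩ := ih acc' hlen'
    refine ⟨hL, fun k hk => ?_⟩
    have hkn : (k : Int) < n := by omega
    have hf : ∀ j ∈ PySem.List.pyRange 0 n, 0 ≤ PySem.Int.mod (hd + j) n ∧
        PySem.Int.mod (hd + j) n < (acc.length : Int) := by
      intro j _
      refine ⟨PySem.Int.mod_nonneg _ hn, ?_⟩
      have := PySem.Int.mod_lt (hd + j) hn
      omega
    have hinner : PySem.List.pyGetD acc' (k : Int) 0 =
        PySem.List.pyGetD acc (k : Int) 0 +
          PySem.List.pyGetD u hd 0 * PySem.List.pyGetD v (((k : Int) - hd) % n) 0 := by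
      rw [hacc', scatter_entry (PySem.List.pyRange 0 n)
        (fun j => PySem.Int.mod (hd + j) n)
        (fun j => PySem.List.pyGetD u hd 0 * PySem.List.pyGetD v j 0) acc hf k (by omega)]
      rw [List.filter_congr (fun j _ => by
        rw [PySem.Int.mod_eq_emod_of_pos hn] :
        ∀ j ∈ PySem.List.pyRange 0 n, decide (PySem.Int.mod (hd + j) n = (k : Int)) =
          decide ((hd + j) % n = (k : Int)))]
      rw [filter_mod_singleton n hd hn k hkn]
      simp
    rw [hE k hk, hinner, List.map_cons, List.sum_cons]
    ring

lemma conv_eq (n : Int) (hn : 0 < n) (u v : List Int) :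
    convA n u v = convB n u v := by
  have hNn : ((n.toNat : Nat) : Int) = n := by omega
  obtain ⟨hlenA, hentA⟩ := conv_outer n hn u v (PySem.List.pyRange 0 n)
    (List.replicate n.toNat 0) (by simp)
  have hlenA' : (convA n u v).length = n.toNat := hlenA
  apply List.ext_getElem (by rw [hlenA', convB_length])
  intro k hk1 hk2
  have hkN : k < n.toNat := by rw [hlenA'] at hk1; exact hk1
  have hkn : (k : Int) < n := by omega
  rw [← List.getD_eq_getElem (convA n u v) 0 hk1, ← List.getD_eq_getElem (convB n u v) 0 hk2,
      ← PySem.List.pyGetD_natCast, ← PySem.List.pyGetD_natCast]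
  have hB : PySem.List.pyGetD (convB n u v) (k : Int) 0 =
      ((PySem.List.pyRange 0 n).map (fun i =>
        PySem.List.pyGetD u i 0 *
          PySem.List.pyGetD v (PySem.Int.mod ((k : Int) - i) n) 0)).sum := by
    unfold convB
    rw [show PySem.List.pyRange 0 n = PySem.List.pyRange 0 ((n.toNat : Nat) : Int) from by
      rw [hNn]]
    rw [PySem.List.pyGetD_map_pyRange _ n.toNat k _ hkN]
  have hA := hentA k hkN
  unfold convA
  rw [hA, hB, PySem.List.pyGetD_natCast, List.getD_replicate _ hkN]
  rw [List.map_congr_left (fun i _ => by rw [PySem.Int.mod_eq_emod_of_pos hn] :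
    ∀ i ∈ PySem.List.pyRange 0 n,
      PySem.List.pyGetD u i 0 * PySem.List.pyGetD v (PySem.Int.mod ((k : Int) - i) n) 0 =
      PySem.List.pyGetD u i 0 * PySem.List.pyGetD v (((k : Int) - i) % n) 0)]
  ring

-- ===== VERDICT (by name: the statement is the Claim_ definition above) =====
theorem solution_spec : Claim_equal_solution := by
  intro x y z a b c n _ hpre
  show solution x y z a b c n = solution_alt x y z a b c n
  unfold Pre_solution at hpre
  rcases le_or_gt n 0 with hn | hn
  · rcases hpre with h1 | ⟨hx, hy, hz⟩
    · omega
    · have hnn : PySem.List.pyRange 0 n = [] := PySem.List.pyRange_one_eq_nil hn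
      have hN : n.toNat = 0 := by omega
      rw [solution_eq]
      simp [solution_alt, lineA, convA, convB, histB, hnn, hN,
        PySem.List.pyRange_one_eq_nil hx, PySem.List.pyRange_one_eq_nil hy,
        PySem.List.pyRange_one_eq_nil hz]
  · rw [solution_eq]
    unfold solution_alt
    rw [hist_eq n x a hn, hist_eq n y b hn, hist_eq n z c hn,
      conv_eq n hn _ _, conv_eq n hn _ _]
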